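-- pv_equiv track=rewrite | github.com/tapetitansdistro-netizen/AutoVO | build_autovo.py | split_narrator_and_dialog
-- ===== SOURCE A (Python) =====
-- def split_narrator_and_dialog(full_text: str):
--     """
--     Split a TLK line into segments tagged as "character" or "narrator"
--     using quote state.
--     """
--     segments = []
--     current = []
--     in_quote = False
--
--     for ch in full_text:
--         if ch == '"':
--             seg_text = "".join(current)
--             if seg_text.strip():
--                 role = "character" if in_quote else "narrator"
--                 segments.append((role, seg_text))
--             current = []
--             in_quote = not in_quote
--         else:
--             current.append(ch)
--
--     if current:
--         seg_text = "".join(current)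
--         if seg_text.strip():
--             role = "character" if in_quote else "narrator"
--             segments.append((role, seg_text))
--
--     return segments
-- ===== SOURCE B (Python) =====
-- def split_narrator_and_dialog(full_text: str):
--     """
--     Split a TLK line into segments tagged as "character" or "narrator":
--     split on '"' once; even-indexed parts are narrator, odd are character.
--     """
--     return [("narrator" if i % 2 == 0 else "character", part)
--             for i, part in enumerate(full_text.split('"'))
--             if part.strip()]
-- ===== Notes on version B (the rewrite author's own statement) =====
-- stated objective: idiomatic
-- what changed: Replaced the char-by-char quote-toggling state machine (explicit current-buffer and in_quote flag) with a single split on the double-quote character followed by an index-parity pass over the parts.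
import Mathlib
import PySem

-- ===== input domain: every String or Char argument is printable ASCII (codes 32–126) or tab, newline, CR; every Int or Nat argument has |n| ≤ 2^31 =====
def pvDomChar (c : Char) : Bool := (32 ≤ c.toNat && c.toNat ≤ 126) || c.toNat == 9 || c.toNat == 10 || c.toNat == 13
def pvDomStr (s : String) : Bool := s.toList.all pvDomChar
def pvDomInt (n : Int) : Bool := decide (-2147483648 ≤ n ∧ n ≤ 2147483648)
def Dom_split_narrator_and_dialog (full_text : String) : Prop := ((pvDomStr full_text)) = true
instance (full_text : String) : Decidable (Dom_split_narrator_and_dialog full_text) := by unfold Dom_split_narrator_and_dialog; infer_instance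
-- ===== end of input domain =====

-- B replaces A's char-by-char quote-toggling state machine with one split on the quote
-- character followed by an index-parity pass over the parts (idiomatic rewrite).

-- ===== PORT A =====
-- literal state machine: (segments, current, in_quote) over the characters
def splitA_go : List Char → List (String × String) → List Char → Bool → List (String × String)
  | [], segs, cur, inq =>
      if cur.isEmpty then segs
      else if PySem.Chars.strip cur = [] then segs
      else segs ++ [((if inq then "character" else "narrator"), String.ofList cur)]
  | c :: cs, segs, cur, inq =>
      if c = '"' then
        splitA_go cs
          (if PySem.Chars.strip cur = [] then segs
           else segs ++ [((if inq then "character" else "narrator"), String.ofList cur)])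
          [] (!inq)
      else
        splitA_go cs segs (cur ++ [c]) inq

def split_narrator_and_dialog (full_text : String) : List (String × String) :=
  splitA_go full_text.toList [] [] false

-- ===== PORT B =====
def split_narrator_and_dialog_alt (full_text : String) : List (String × String) :=
  (PySem.List.enumerate (PySem.Chars.splitOn full_text.toList ['"'])).filterMap
    (fun p => if PySem.Chars.strip p.2 = [] then none
              else some ((if p.1 % 2 == 0 then "narrator" else "character"), String.ofList p.2))

-- ===== PRECONDITION & SPEC =====
def Spec_split_narrator_and_dialog (full_text : String) (out : List (String × String)) : Prop := out = split_narrator_and_dialog_alt full_text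
instance (full_text : String) (out : List (String × String)) : Decidable (Spec_split_narrator_and_dialog full_text out) := by unfold Spec_split_narrator_and_dialog; infer_instance

-- ===== CLAIM (what is proved, stated in full; the proofs are below) =====
def Claim_equal_split_narrator_and_dialog : Prop := ∀ (full_text : String), Dom_split_narrator_and_dialog full_text → Spec_split_narrator_and_dialog full_text (split_narrator_and_dialog full_text)

-- ===== LEMMAS AND PROOFS =====

-- simple structural recursion computing split on '"'
def sp : List Char → List (List Char)
  | [] => [[]]
  | c :: cs => if c = '"' then [] :: sp cs else (sp cs).modifyHead (c :: ·)

def emitMid (cur : List Char) (inq : Bool) : List (String × String) :=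
  if PySem.Chars.strip cur = [] then []
  else [((if inq then "character" else "narrator"), String.ofList cur)]

def goSeg : List (List Char) → List Char → Bool → List (String × String)
  | [], _, _ => []
  | p :: ps, cur, inq => emitMid (cur ++ p) inq ++ goSeg ps [] (!inq)

lemma sp_ne_nil (cs : List Char) : sp cs ≠ [] := by
  induction cs with
  | nil => simp [sp]
  | cons c cs ih =>
      simp only [sp]
      split
      · simp
      · cases h : sp cs with
        | nil => exact absurd h ih
        | cons p ps => simp

lemma go_eq : ∀ (fuel : Nat) (l cur : List Char) (acc : List (List Char)),
    l.length ≤ fuel →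
    PySem.Chars.splitOn.go ['"'] fuel l cur acc
      = acc.reverse ++ (sp l).modifyHead (cur.reverse ++ ·) := by
  intro fuel
  induction fuel with
  | zero =>
      intro l cur acc h
      have hl : l = [] := by
        cases l with
        | nil => rfl
        | cons a l => simp at h
      subst hl
      simp [PySem.Chars.splitOn.go, sp]
  | succ fuel ih =>
      intro l cur acc h
      cases l with
      | nil => simp [PySem.Chars.splitOn.go, sp]
      | cons c rest =>
          by_cases hc : c = '"'
          · subst hc
            have : PySem.Chars.splitOn.go ['"'] (fuel+1) ('"' :: rest) cur acc
                = PySem.Chars.splitOn.go ['"'] fuel rest [] (cur.reverse :: acc) := by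
              simp [PySem.Chars.splitOn.go, List.isPrefixOf]
            rw [this, ih rest [] (cur.reverse :: acc) (by simpa using Nat.le_of_succ_le_succ h)]
            have hid : (sp rest).modifyHead (([] : List Char).reverse ++ ·) = sp rest := by
              cases sp rest <;> simp
            rw [hid]
            simp [sp]
          · have : PySem.Chars.splitOn.go ['"'] (fuel+1) (c :: rest) cur acc
                = PySem.Chars.splitOn.go ['"'] fuel rest (c :: cur) acc := by
              simp [PySem.Chars.splitOn.go, List.isPrefixOf, (Ne.symm hc)]
            rw [this, ih rest (c :: cur) acc (by simpa using Nat.le_of_succ_le_succ h)]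
            simp [sp, hc]
            cases hsp : sp rest with
            | nil => exact absurd hsp (sp_ne_nil rest)
            | cons p ps => simp

lemma splitOn_eq_sp (cs : List Char) : PySem.Chars.splitOn cs ['"'] = sp cs := by
  unfold PySem.Chars.splitOn
  rw [go_eq (cs.length + 1) cs [] [] (by omega)]
  cases sp cs <;> simp

lemma goSeg_modifyHead (ps : List (List Char)) (c : Char) (cur : List Char) (inq : Bool)
    (h : ps ≠ []) :
    goSeg (ps.modifyHead (c :: ·)) cur inq = goSeg ps (cur ++ [c]) inq := by
  cases ps with
  | nil => exact absurd rfl h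
  | cons p ps =>
      have hcons : cur ++ c :: p = (cur ++ [c]) ++ p := by simp
      simp only [List.modifyHead_cons, goSeg, hcons]

lemma splitA_inv : ∀ (cs : List Char) (segs : List (String × String)) (cur : List Char) (inq : Bool),
    splitA_go cs segs cur inq = segs ++ goSeg (sp cs) cur inq := by
  intro cs
  induction cs with
  | nil =>
      intro segs cur inq
      by_cases hcur : cur = []
      · subst hcur
        simp [splitA_go, sp, goSeg, emitMid, PySem.Chars.strip, PySem.Chars.lstrip, PySem.Chars.rstrip]
      · by_cases hstrip : PySem.Chars.strip cur = []
        · simp [splitA_go, sp, goSeg, emitMid, hcur, hstrip]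
        · simp [splitA_go, sp, goSeg, emitMid, hcur, hstrip]
  | cons c cs ih =>
      intro segs cur inq
      by_cases hc : c = '"'
      · subst hc
        have hA : splitA_go ('"' :: cs) segs cur inq
            = splitA_go cs (segs ++ emitMid cur inq) [] (!inq) := by
          by_cases hstrip : PySem.Chars.strip cur = [] <;>
            simp [splitA_go, emitMid, hstrip]
        rw [hA, ih]
        have : sp ('"' :: cs) = [] :: sp cs := by simp [sp]
        rw [this]
        simp [goSeg]
      · have hA : splitA_go (c :: cs) segs cur inq = splitA_go cs segs (cur ++ [c]) inq := by
          simp [splitA_go, hc]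
        rw [hA, ih]
        have : sp (c :: cs) = (sp cs).modifyHead (c :: ·) := by simp [sp, hc]
        rw [this, goSeg_modifyHead _ _ _ _ (sp_ne_nil cs)]

lemma parity_succ (i : Int) : ((i + 1) % 2 != 0) = !(i % 2 != 0) := by
  rcases Int.emod_two_eq i with h | h
  · have h1 : (i + 1) % 2 = 1 := by omega
    simp [h, h1]
  · have h1 : (i + 1) % 2 = 0 := by omega
    simp [h, h1]

lemma enum_eq : ∀ (ps : List (List Char)) (i : Int),
    (PySem.List.enumerate ps i).filterMap
      (fun p => if PySem.Chars.strip p.2 = [] then none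
                else some ((if p.1 % 2 == 0 then "narrator" else "character"), String.ofList p.2))
      = goSeg ps [] (i % 2 != 0) := by
  intro ps
  induction ps with
  | nil => intro i; simp [goSeg, PySem.List.enumerate]
  | cons p ps ih =>
      intro i
      rw [PySem.List.enumerate_cons]
      rw [List.filterMap_cons]
      rw [ih (i + 1), parity_succ]
      simp only [goSeg, List.nil_append, emitMid]
      by_cases hstrip : PySem.Chars.strip p = []
      · simp [hstrip]
      · rcases Int.emod_two_eq i with h | h <;> simp [hstrip, h]

-- ===== VERDICT (by name: the statement is the Claim_ definition above) =====
theorem split_narrator_and_dialog_spec : Claim_equal_split_narrator_and_dialog := by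
  intro ft _
  unfold Spec_split_narrator_and_dialog split_narrator_and_dialog split_narrator_and_dialog_alt
  rw [splitOn_eq_sp, enum_eq, splitA_inv]
  norm_num
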